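-- pv_equiv track=rewrite | github.com/Archit-1233/Physician-Notetaker | app/entity_mapper.py | map_entities_to_fields
-- ===== SOURCE A (Python) =====
-- NER_TO_OUTPUT = {
--     "Sign_symptom": "Symptoms",
--     "Therapeutic_procedure": "Treatment",
--     "Medication": "Treatment",
--     "Diagnosis": "Diagnosis"
-- }
--
-- def map_entities_to_fields(entities):
--     result = {}
--     for ner_label, terms in entities.items():
--         output_key = NER_TO_OUTPUT.get(ner_label)
--         if output_key:
--             result.setdefault(output_key, []).extend(terms)
--     # Deduplicate and sort
--     for k in result:
--         result[k] = sorted(set(result[k]))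
--     return result
-- ===== SOURCE B (Python) =====
-- NER_TO_OUTPUT = {
--     "Sign_symptom": "Symptoms",
--     "Therapeutic_procedure": "Treatment",
--     "Medication": "Treatment",
--     "Diagnosis": "Diagnosis"
-- }
--
-- # Inverted mapping: each output field with the NER labels that feed it.
-- SOURCES = {
--     "Symptoms": ["Sign_symptom"],
--     "Treatment": ["Therapeutic_procedure", "Medication"],
--     "Diagnosis": ["Diagnosis"],
-- }
--
-- def map_entities_to_fields(entities):
--     # Output fields in order of first appearance of a feeding label.
--     fields = []
--     for label in entities:
--         field = NER_TO_OUTPUT.get(label)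
--         if field and field not in fields:
--             fields.append(field)
--     # For each field, gather the terms of every present source label.
--     result = {}
--     for f in fields:
--         gathered = []
--         for label in SOURCES.get(f, []):
--             if label in entities:
--                 gathered.extend(entities[label])
--         result[f] = sorted(set(gathered))
--     return result
-- ===== Notes on version B (the rewrite author's own statement) =====
-- stated objective: alternative
-- what changed: B inverts the traversal: instead of A's single pass over entity labels growing a result dict per label, B first computes the output fields in order of first feeding label, then gathers each field's terms from an inverted SOURCES table (field -> feeding NER labels) with per-label dict lookups.
import Mathlib
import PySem

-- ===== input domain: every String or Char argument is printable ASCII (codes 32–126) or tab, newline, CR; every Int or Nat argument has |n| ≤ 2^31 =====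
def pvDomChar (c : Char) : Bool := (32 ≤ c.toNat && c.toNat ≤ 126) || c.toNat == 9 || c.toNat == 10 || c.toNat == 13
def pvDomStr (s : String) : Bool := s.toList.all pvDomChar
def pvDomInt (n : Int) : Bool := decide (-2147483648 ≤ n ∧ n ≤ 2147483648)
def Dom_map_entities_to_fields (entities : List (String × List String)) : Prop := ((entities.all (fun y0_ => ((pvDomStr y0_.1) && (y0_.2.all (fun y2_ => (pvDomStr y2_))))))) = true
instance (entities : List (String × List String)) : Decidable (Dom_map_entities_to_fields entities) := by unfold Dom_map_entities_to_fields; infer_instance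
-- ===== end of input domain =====

-- B flips the traversal: instead of A's single pass over the entity labels that grows a result
-- dict per label, B first lists the output fields (in order of first feeding label) and then
-- gathers, per field, the terms of its source labels via an inverted SOURCES table (objective:
-- alternative decomposition, same cost). Equality proved on assoc lists whose keys are distinct.

-- ===== PORT A =====
def nerToOutput : PySem.Dict String String :=
  PySem.Dict.ofList [("Sign_symptom", "Symptoms"), ("Therapeutic_procedure", "Treatment"),
                     ("Medication", "Treatment"), ("Diagnosis", "Diagnosis")]

def map_entities_to_fields (entities : List (String × List String)) : List (String × List String) :=
  let result : PySem.Dict String (List String) :=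
    entities.foldl (fun result p =>
      match nerToOutput.get? p.1 with
      | some k => if k ≠ "" then result.modify k [] (· ++ p.2) else result
      | none => result) PySem.Dict.empty
  result.items.map (fun p => (p.1, PySem.List.sorted (PySem.Set.ofList p.2) (fun x => x)))

-- ===== PORT B =====
def sourcesFor : PySem.Dict String (List String) :=
  PySem.Dict.ofList [("Symptoms", ["Sign_symptom"]),
                     ("Treatment", ["Therapeutic_procedure", "Medication"]),
                     ("Diagnosis", ["Diagnosis"])]

def map_entities_to_fields_alt (entities : List (String × List String)) : List (String × List String) :=
  let fields : List String :=
    entities.foldl (fun fs p =>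
      match nerToOutput.get? p.1 with
      | some f => if f ≠ "" ∧ f ∉ fs then fs ++ [f] else fs
      | none => fs) []
  fields.map (fun f =>
    let gathered : List String :=
      (sourcesFor.getD f []).foldl (fun acc l =>
        match (PySem.Dict.mk entities).get? l with
        | some ts => acc ++ ts
        | none => acc) []
    (f, PySem.List.sorted (PySem.Set.ofList gathered) (fun x => x)))

-- ===== PRECONDITION & SPEC =====
-- Pre_ excludes assoc lists with duplicate keys: they do not represent a Python dict (the
-- callers pass a dict, whose keys are unique), and A reads every occurrence while B reads the
-- first, so their values on such non-dict lists are accidental.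
def Pre_map_entities_to_fields (entities : List (String × List String)) : Prop :=
  (entities.map Prod.fst).Nodup
instance (entities : List (String × List String)) : Decidable (Pre_map_entities_to_fields entities) := by
  unfold Pre_map_entities_to_fields; infer_instance

def pvWitness_map_entities_to_fields : (List (String × List String)) :=
  [("Sign_symptom", ["fever", "cough"]), ("Medication", ["ibuprofen"]), ("Other", ["x"])]

def Spec_map_entities_to_fields (entities : List (String × List String)) (out : List (String × List String)) : Prop := out = map_entities_to_fields_alt entities
instance (entities : List (String × List String)) (out : List (String × List String)) : Decidable (Spec_map_entities_to_fields entities out) := by unfold Spec_map_entities_to_fields; infer_instance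

-- ===== CLAIM (what is proved, stated in full; the proofs are below) =====
def Claim_equal_map_entities_to_fields : Prop := ∀ (entities : List (String × List String)), Dom_map_entities_to_fields entities → Pre_map_entities_to_fields entities → Spec_map_entities_to_fields entities (map_entities_to_fields entities)

-- ===== LEMMAS AND PROOFS =====

-- terms contributed to field f by A's pass, in entity order
def pvCollect (es : List (String × List String)) (f : String) : List String :=
  (es.filter (fun p => nerToOutput.get? p.1 == some f)).flatMap Prod.snd

-- the output fields in order of first appearance (B's first loop)
def pvFields (es : List (String × List String)) : List String :=
  es.foldl (fun fs p =>
    match nerToOutput.get? p.1 with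
    | some f => if f ≠ "" ∧ f ∉ fs then fs ++ [f] else fs
    | none => fs) []

lemma tbl_cases (l k : String) (h : nerToOutput.get? l = some k) :
    (l = "Sign_symptom" ∧ k = "Symptoms") ∨ (l = "Therapeutic_procedure" ∧ k = "Treatment") ∨
    (l = "Medication" ∧ k = "Treatment") ∨ (l = "Diagnosis" ∧ k = "Diagnosis") := by
  simp only [nerToOutput, PySem.Dict.ofList, PySem.Dict.update, List.foldl,
    PySem.Dict.get?_insert] at h
  split_ifs at h with h1 h2 h3 h4 <;>
    simp_all [PySem.Dict.get?_empty]

lemma pvCollect_cons (p : String × List String) (tl : List (String × List String)) (f : String) :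
    pvCollect (p :: tl) f
      = (if nerToOutput.get? p.1 = some f then p.2 else []) ++ pvCollect tl f := by
  unfold pvCollect
  by_cases hc : nerToOutput.get? p.1 = some f <;> simp [hc]

lemma pvMain (es : List (String × List String)) : ∀ (fs : List String) (g : String → List String),
    fs.Nodup → (∀ f, f ∉ fs → g f = []) →
    (es.foldl (fun result p =>
        match nerToOutput.get? p.1 with
        | some k => if k ≠ "" then result.modify k [] (· ++ p.2) else result
        | none => result) (PySem.Dict.mk (fs.map (fun f => (f, g f))))).items
      = (es.foldl (fun fs p =>
          match nerToOutput.get? p.1 with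
          | some f => if f ≠ "" ∧ f ∉ fs then fs ++ [f] else fs
          | none => fs) fs).map (fun f => (f, g f ++ pvCollect es f)) := by
  induction es with
  | nil =>
      intro fs g _ _
      simp [pvCollect]
  | cons p tl ih =>
      intro fs g hnd hg
      have hkeys : (PySem.Dict.mk (fs.map (fun f => (f, g f)))).keys = fs := by
        simp [PySem.Dict.keys, Function.comp_def]
      cases h : nerToOutput.get? p.1 with
      | none =>
          simp only [List.foldl_cons, h]
          rw [ih fs g hnd hg]
          apply List.map_congr_left
          intro f _
          rw [pvCollect_cons, h]
          simp
      | some k =>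
          have hk3 := tbl_cases p.1 k h
          have hkne : k ≠ "" := by
            rcases hk3 with ⟨_, rfl⟩ | ⟨_, rfl⟩ | ⟨_, rfl⟩ | ⟨_, rfl⟩ <;> decide
          by_cases hkfs : k ∈ fs
          · -- existing field: modify overwrites in place
            have hmem : (k, g k) ∈ (PySem.Dict.mk (fs.map (fun f => (f, g f)))).items :=
              List.mem_map_of_mem hkfs
            have hcont : (PySem.Dict.mk (fs.map (fun f => (f, g f)))).contains k = true := by
              rw [PySem.Dict.contains_iff_mem_keys, hkeys]; exact hkfs
            have hgetD : (PySem.Dict.mk (fs.map (fun f => (f, g f)))).getD k [] = g k :=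
              PySem.Dict.getD_of_mem_items _ hmem (by rw [hkeys]; exact hnd) []
            have hstep : (PySem.Dict.mk (fs.map (fun f => (f, g f)))).modify k [] (· ++ p.2)
                = PySem.Dict.mk (fs.map (fun f => (f, (if f = k then g f ++ p.2 else g f)))) := by
              apply PySem.Dict.ext
              rw [PySem.Dict.modify, hgetD, PySem.Dict.items_insert_of_contains _ _ hcont]
              simp only [List.map_map]
              apply List.map_congr_left
              intro f _
              by_cases hf : f = k <;> simp [hf]
            have hfseq : (if k ≠ "" ∧ k ∉ fs then fs ++ [k] else fs) = fs := by
              simp [hkfs]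
            simp only [List.foldl_cons, h, if_pos hkne, hstep, hfseq]
            rw [ih fs (fun f => if f = k then g f ++ p.2 else g f) hnd
                  (by intro f hf; have : f ≠ k := fun e => hf (e ▸ hkfs); simp [this, hg f hf])]
            apply List.map_congr_left
            intro f _
            rw [pvCollect_cons, h]
            by_cases hf : f = k
            · subst hf; simp [List.append_assoc]
            · have hne : some k ≠ some f := by
                intro e; exact hf (Option.some.inj e).symm
              simp [hf, hne]
          · -- new field: modify appends at the end
            have hcont : (PySem.Dict.mk (fs.map (fun f => (f, g f)))).contains k = false := by
              rw [← Bool.not_eq_true, PySem.Dict.contains_iff_mem_keys, hkeys]; exact hkfs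
            have hgetD : (PySem.Dict.mk (fs.map (fun f => (f, g f)))).getD k [] = [] :=
              PySem.Dict.getD_of_not_contains _ [] hcont
            have hstep : (PySem.Dict.mk (fs.map (fun f => (f, g f)))).modify k [] (· ++ p.2)
                = PySem.Dict.mk ((fs ++ [k]).map (fun f => (f, (if f = k then p.2 else g f)))) := by
              apply PySem.Dict.ext
              rw [PySem.Dict.modify, hgetD, PySem.Dict.items_insert_of_not_contains _ _ hcont]
              simp only [List.map_append, List.map_cons, List.map_nil]
              congr 1
              apply List.map_congr_left
              intro f hf
              have : f ≠ k := fun e => hkfs (e ▸ hf)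
              simp [this]
            have hfseq : (if k ≠ "" ∧ k ∉ fs then fs ++ [k] else fs) = fs ++ [k] := by
              simp [hkfs, hkne]
            simp only [List.foldl_cons, h, if_pos hkne, hstep, hfseq]
            have hnd' : (fs ++ [k]).Nodup := by
              simp [List.nodup_append, hnd]
              intro a ha e; subst e; exact hkfs ha
            rw [ih (fs ++ [k]) (fun f => if f = k then p.2 else g f) hnd'
                  (by intro f hf
                      simp only [List.mem_append, List.mem_singleton, not_or] at hf
                      simp [hf.2, hg f hf.1])]
            apply List.map_congr_left
            intro f hf
            rw [pvCollect_cons, h]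
            by_cases hfk : f = k
            · subst hfk
              simp [hg f hkfs]
            · have hne : some k ≠ some f := by
                intro e; exact hfk (Option.some.inj e).symm
              simp [hfk, hne]

lemma itemsA (es : List (String × List String)) :
    (es.foldl (fun result p =>
        match nerToOutput.get? p.1 with
        | some k => if k ≠ "" then result.modify k [] (· ++ p.2) else result
        | none => result) PySem.Dict.empty).items
      = (pvFields es).map (fun f => (f, pvCollect es f)) := by
  have h := pvMain es [] (fun _ => []) List.nodup_nil (fun _ _ => rfl)
  simpa [pvFields, PySem.Dict.empty] using h

lemma fields_mem (es : List (String × List String)) :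
    ∀ f ∈ pvFields es, f = "Symptoms" ∨ f = "Treatment" ∨ f = "Diagnosis" := by
  unfold pvFields
  suffices h : ∀ (fs : List String),
      (∀ f ∈ fs, f = "Symptoms" ∨ f = "Treatment" ∨ f = "Diagnosis") →
      ∀ f ∈ es.foldl (fun fs p =>
          match nerToOutput.get? p.1 with
          | some f => if f ≠ "" ∧ f ∉ fs then fs ++ [f] else fs
          | none => fs) fs, f = "Symptoms" ∨ f = "Treatment" ∨ f = "Diagnosis" by
    exact h [] (by simp)
  induction es with
  | nil => intro fs hfs; simpa using hfs
  | cons p tl ih =>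
      intro fs hfs
      simp only [List.foldl_cons]
      cases h : nerToOutput.get? p.1 with
      | none => exact ih fs hfs
      | some k =>
          apply ih
          intro f hf
          have hf' : f ∈ (if k ≠ "" ∧ k ∉ fs then fs ++ [k] else fs) := hf
          by_cases hc : k ≠ "" ∧ k ∉ fs
          · rw [if_pos hc] at hf'
            rcases List.mem_append.1 hf' with hf'' | hf''
            · exact hfs f hf''
            · have h3 := tbl_cases p.1 k h
              simp only [List.mem_singleton] at hf''
              subst hf''
              tauto
          · rw [if_neg hc] at hf'
            exact hfs f hf'

lemma mem_collect (es : List (String × List String)) (f t : String) :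
    t ∈ pvCollect es f ↔ ∃ p ∈ es, nerToOutput.get? p.1 = some f ∧ t ∈ p.2 := by
  simp [pvCollect, List.mem_flatMap, List.mem_filter]
  tauto

lemma mem_gather (es : List (String × List String))
    (hnd : (PySem.Dict.mk es).keys.Nodup) (ls : List String) (t : String) :
    t ∈ ls.foldl (fun acc l =>
        match (PySem.Dict.mk es).get? l with
        | some ts => acc ++ ts
        | none => acc) []
      ↔ ∃ l ∈ ls, ∃ ts, (l, ts) ∈ es ∧ t ∈ ts := by
  have hbody : ∀ (acc : List String) (l : String),
      (match (PySem.Dict.mk es).get? l with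
       | some ts => acc ++ ts
       | none => acc)
        = acc ++ (match (PySem.Dict.mk es).get? l with
                  | some ts => ts
                  | none => []) := by
    intro acc l
    cases (PySem.Dict.mk es).get? l <;> simp
  simp only [hbody]
  rw [PySem.List.foldl_append_eq_flatMap]
  simp only [List.nil_append, List.mem_flatMap]
  constructor
  · rintro ⟨l, hl, ht⟩
    cases hts : (PySem.Dict.mk es).get? l with
    | none => rw [hts] at ht; simp at ht
    | some ts =>
        rw [hts] at ht
        exact ⟨l, hl, ts, (PySem.Dict.get?_eq_some_iff_mem_items _ _ _ hnd).1 hts, ht⟩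
  · rintro ⟨l, hl, ts, hmem, ht⟩
    refine ⟨l, hl, ?_⟩
    rw [(PySem.Dict.get?_eq_some_iff_mem_items (PySem.Dict.mk es) l ts hnd).2 hmem]
    exact ht

lemma value_eq (es : List (String × List String))
    (hnd : (es.map Prod.fst).Nodup) (f : String)
    (hf : f = "Symptoms" ∨ f = "Treatment" ∨ f = "Diagnosis") :
    PySem.List.sorted (PySem.Set.ofList (pvCollect es f)) (fun x => x)
      = PySem.List.sorted (PySem.Set.ofList
          ((sourcesFor.getD f []).foldl (fun acc l =>
            match (PySem.Dict.mk es).get? l with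
            | some ts => acc ++ ts
            | none => acc) [])) (fun x => x) := by
  have hndk : (PySem.Dict.mk es).keys.Nodup := hnd
  have hsrc : ∀ l : String, nerToOutput.get? l = some f ↔ l ∈ sourcesFor.getD f [] := by
    intro l
    constructor
    · intro h
      rcases hf with rfl | rfl | rfl <;>
        rcases tbl_cases l _ h with ⟨hl, hk⟩ | ⟨hl, hk⟩ | ⟨hl, hk⟩ | ⟨hl, hk⟩ <;>
        first
          | exact absurd hk (by decide)
          | (subst hl; decide)
    · intro h
      rcases hf with rfl | rfl | rfl
      · have h' : l ∈ (["Sign_symptom"] : List String) := h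
        simp only [List.mem_singleton] at h'
        subst h'; decide
      · have h' : l ∈ (["Therapeutic_procedure", "Medication"] : List String) := h
        simp only [List.mem_cons, List.not_mem_nil, or_false] at h'
        rcases h' with rfl | rfl <;> decide
      · have h' : l ∈ (["Diagnosis"] : List String) := h
        simp only [List.mem_singleton] at h'
        subst h'; decide
  apply PySem.List.sorted_eq_sorted_of_perm _ _ _ (fun a b hab => hab)
  rw [List.perm_ext_iff_of_nodup (PySem.Set.nodup_ofList _) (PySem.Set.nodup_ofList _)]
  intro t
  rw [PySem.Set.mem_ofList, PySem.Set.mem_ofList, mem_collect, mem_gather es hndk]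
  constructor
  · rintro ⟨p, hp, hget, ht⟩
    exact ⟨p.1, (hsrc p.1).1 hget, p.2, by simpa using hp, ht⟩
  · rintro ⟨l, hl, ts, hmem, ht⟩
    exact ⟨(l, ts), hmem, (hsrc l).2 hl, ht⟩

-- ===== VERDICT (by name: the statement is the Claim_ definition above) =====
theorem map_entities_to_fields_spec : Claim_equal_map_entities_to_fields := by
  intro es _ hpre
  unfold Spec_map_entities_to_fields
  show ((es.foldl (fun result p =>
          match nerToOutput.get? p.1 with
          | some k => if k ≠ "" then result.modify k [] (· ++ p.2) else result
          | none => result) PySem.Dict.empty).items.map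
        (fun p => (p.1, PySem.List.sorted (PySem.Set.ofList p.2) (fun x => x))))
      = (pvFields es).map (fun f =>
          (f, PySem.List.sorted (PySem.Set.ofList
            ((sourcesFor.getD f []).foldl (fun acc l =>
              match (PySem.Dict.mk es).get? l with
              | some ts => acc ++ ts
              | none => acc) [])) (fun x => x)))
  rw [itemsA, List.map_map]
  apply List.map_congr_left
  intro f hfmem
  have h3 := fields_mem es f hfmem
  simp only [Function.comp_def]
  exact congrArg (fun v => (f, v)) (value_eq es hpre f h3)
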